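-- pv_equiv track=rewrite | github.com/iamnshrd/mentions | agents/mentions/services/analysis/speaker.py | _best_excerpt
-- ===== SOURCE A (Python) =====
-- def _best_excerpt(texts: list[str], query: str) -> str:
--     """Select the most relevant excerpt for *query* from a list of texts."""
--     if not texts:
--         return ''
--     q_words = set(query.lower().split())
--     scored = []
--     for text in texts:
--         t_lower = text.lower()
--         score = sum(1 for w in q_words if w in t_lower)
--         scored.append((score, text))
--     scored.sort(key=lambda x: -x[0])
--     best = scored[0][1]
--     # Truncate to ~200 chars at sentence boundary
--     if len(best) > 200:
--         cutoff = best[:200].rfind('. ')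
--         if cutoff > 100:
--             best = best[:cutoff + 1]
--         else:
--             best = best[:200] + '…'
--     return best
-- ===== SOURCE B (Python) =====
-- def _score(t_lower, q_words):
--     return sum(1 for w in q_words if w in t_lower)
--
-- def _truncate(best):
--     if len(best) > 200:
--         cutoff = best[:200].rfind('. ')
--         if cutoff > 100:
--             return best[:cutoff + 1]
--         return best[:200] + '…'
--     return best
--
-- def _best_excerpt(texts: list, query: str) -> str:
--     if not texts:
--         return ''
--     q_words = set(query.lower().split())
--     best = max(texts, key=lambda t: _score(t.lower(), q_words))
--     return _truncate(best)
-- ===== Notes on version B (the rewrite author's own statement) =====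
-- stated objective: simpler
-- what changed: B replaces A's build-a-(score,text)-list, full stable sort by negated score and take-first with a single running-best pass via max(texts, key=score), which picks the first maximal element exactly as the stable sort does; scoring and the 200-char sentence-boundary truncation are unchanged.
import Mathlib
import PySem

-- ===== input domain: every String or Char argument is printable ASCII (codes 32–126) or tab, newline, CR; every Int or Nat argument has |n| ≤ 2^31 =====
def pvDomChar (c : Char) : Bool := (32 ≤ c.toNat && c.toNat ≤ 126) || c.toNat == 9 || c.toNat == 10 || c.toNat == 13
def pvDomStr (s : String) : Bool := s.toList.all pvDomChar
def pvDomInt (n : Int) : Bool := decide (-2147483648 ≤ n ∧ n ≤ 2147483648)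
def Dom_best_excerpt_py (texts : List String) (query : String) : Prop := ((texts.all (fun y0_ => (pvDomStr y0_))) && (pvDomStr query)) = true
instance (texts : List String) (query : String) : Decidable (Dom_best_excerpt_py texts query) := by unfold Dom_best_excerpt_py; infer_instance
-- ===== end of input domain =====

-- B replaces A's build-score-list + full sort + take-first with a single max(texts, key=score) pass;
-- the scoring and the 200-char sentence-boundary truncation are unchanged. Objective: simpler.

-- ===== PORT A =====
-- score of one text: number of distinct query words occurring as substrings of text.lower()
def pvScore (q_words : List String) (text : String) : Int :=
  (q_words.map (fun w => if PySem.Str.isIn w (PySem.Str.lower text) then (1 : Int) else 0)).sum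

def best_excerpt_py (texts : List String) (query : String) : String :=
  if texts = [] then "" else
  let q_words : List String := PySem.Set.ofList (PySem.Str.split₀ (PySem.Str.lower query))
  let scored : List (Int × String) :=
    texts.foldl (fun acc text => acc ++ [(pvScore q_words text, text)]) []
  let sortedScored := PySem.List.sorted scored (fun x => -x.1)
  let best := (sortedScored.headD ((0 : Int), "")).2   -- scored[0][1]; list nonempty since texts ≠ []
  if PySem.Str.len best > 200 then
    let cutoff := PySem.Str.rfind (PySem.Str.slice best none (some 200)) ". "
    if cutoff > 100 then PySem.Str.slice best none (some (cutoff + 1))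
    else PySem.Str.slice best none (some 200) ++ "…"
  else best

-- ===== PORT B =====
def pvTruncate (best : String) : String :=
  if PySem.Str.len best > 200 then
    let cutoff := PySem.Str.rfind (PySem.Str.slice best none (some 200)) ". "
    if cutoff > 100 then PySem.Str.slice best none (some (cutoff + 1))
    else PySem.Str.slice best none (some 200) ++ "…"
  else best

def best_excerpt_py_alt (texts : List String) (query : String) : String :=
  if texts = [] then "" else
  let q_words : List String := PySem.Set.ofList (PySem.Str.split₀ (PySem.Str.lower query))
  pvTruncate (PySem.List.maxD texts (fun t => pvScore q_words t) "")

-- ===== PRECONDITION & SPEC =====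
def Spec_best_excerpt_py (texts : List String) (query : String) (out : String) : Prop := out = best_excerpt_py_alt texts query
instance (texts : List String) (query : String) (out : String) : Decidable (Spec_best_excerpt_py texts query out) := by unfold Spec_best_excerpt_py; infer_instance

-- ===== CLAIM (what is proved, stated in full; the proofs are below) =====
def Claim_equal_best_excerpt_py : Prop := ∀ (texts : List String) (query : String), Dom_best_excerpt_py texts query → Spec_best_excerpt_py texts query (best_excerpt_py texts query)

-- ===== LEMMAS AND PROOFS =====

-- head of Python's stable sort = first key-minimal element (what min? returns)
theorem head?_sorted_eq_min? {α κ : Type} [LinearOrder κ] (xs : List α) (key : α → κ) :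
    (PySem.List.sorted xs key).head? = PySem.List.min? xs key := by
  induction xs using List.reverseRecOn with
  | nil => rfl
  | append_singleton xs x ih =>
    rw [PySem.List.sorted_eq_foldl_insertBy, List.foldl_append,
        ← PySem.List.sorted_eq_foldl_insertBy] at *
    simp only [PySem.List.min?, List.foldl_append, List.foldl_cons, List.foldl_nil] at *
    cases h : PySem.List.sorted xs key with
    | nil =>
      rw [h] at ih
      simp only [List.head?_nil] at ih
      rw [← ih]
      rfl
    | cons m t =>
      rw [h] at ih
      simp only [List.head?_cons] at ih
      rw [← ih]
      simp only [PySem.List.insertBy]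
      by_cases hlt : key x < key m
      · simp [hlt]
      · simp [hlt]

-- min? with the negated key is max? with the key (same first-extremal tie rule)
theorem min?_neg_eq_max? {α : Type} (xs : List α) (key : α → Int) :
    PySem.List.min? xs (fun a => -key a) = PySem.List.max? xs key := by
  simp only [PySem.List.min?, PySem.List.max?]
  congr 1
  funext acc x
  cases acc with
  | none => rfl
  | some m => simp only [neg_lt_neg_iff]

-- max? over a mapped list
theorem max?_map {α β κ : Type} [LT κ] [DecidableLT κ] (f : α → β) (xs : List α) (key : β → κ) :
    PySem.List.max? (xs.map f) key = (PySem.List.max? xs (fun a => key (f a))).map f := by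
  have h : ∀ (ys : List α) (acc : Option α),
      List.foldl (fun acc x => match acc with
        | none => some (f x)
        | some m => if key m < key (f x) then some (f x) else some m) (acc.map f) ys
      = (List.foldl (fun acc x => match acc with
        | none => some x
        | some m => if key (f m) < key (f x) then some x else some m) acc ys).map f := by
    intro ys
    induction ys with
    | nil => intro acc; rfl
    | cons z zs ihz =>
      intro acc
      cases acc with
      | none => simpa using ihz (some z)
      | some m =>
        simp only [List.foldl_cons, Option.map_some]
        by_cases hc : key (f m) < key (f z)
        · simpa [hc] using ihz (some z)
        · simpa [hc] using ihz (some m)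
  simpa only [PySem.List.max?, List.foldl_map, Option.map_none] using h xs none

theorem best_eq (texts : List String) (q_words : List String) (h : texts ≠ []) :
    ((PySem.List.sorted
        (texts.foldl (fun acc text => acc ++ [(pvScore q_words text, text)]) [])
        (fun x => -x.1)).headD ((0 : Int), "")).2
      = PySem.List.maxD texts (fun t => pvScore q_words t) "" := by
  rw [PySem.List.foldl_append_singleton_eq_map, List.nil_append]
  have h1 := head?_sorted_eq_min?
      (texts.map (fun t => (pvScore q_words t, t))) (fun x : Int × String => -x.1)
  rw [min?_neg_eq_max?, max?_map] at h1
  cases hm : PySem.List.max? texts (fun t => pvScore q_words t) with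
  | none => exact absurd (PySem.List.max?_eq_none_iff _ _ |>.mp hm) h
  | some m =>
    rw [hm] at h1
    simp only [Option.map_some] at h1
    rw [List.headD_eq_head?_getD, h1, PySem.List.maxD, hm]
    rfl

-- ===== VERDICT (by name: the statement is the Claim_ definition above) =====
theorem best_excerpt_py_spec : Claim_equal_best_excerpt_py := by
  intro texts query _
  unfold Spec_best_excerpt_py best_excerpt_py best_excerpt_py_alt pvTruncate
  by_cases h : texts = []
  · simp [h]
  · simp only [h, if_false]
    rw [best_eq texts _ h]
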